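-- pv_equiv track=rewrite | github.com/ys0823/python-100examples | 100 examples/45.py | balance_point
-- ===== SOURCE A (Python) =====
-- def balance_point(thy_list):
--     num = len(thy_list)
--     if num > 3:
--         for i in range(num):
--             if i ==0:
--                 pass
--             else:
--                 list1 = thy_list[:i]
--                 list2 = thy_list[i+1:]
--                 sum1 = sum(list1)
--                 sum2 = sum(list2)
--                 if sum1 == sum2:
--                     return ('平衡点:%d,值为:%d'%(i,thy_list[i]))
--         return ('无平衡点')
--     else:
--         return('至少输入3个元素以上的列表')
-- ===== SOURCE B (Python) =====
-- def balance_point(thy_list):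
--     if len(thy_list) > 3:
--         total = sum(thy_list)
--         prefix = thy_list[0]
--         i = 1
--         for x in thy_list[1:]:
--             if 2 * prefix + x == total:
--                 return '平衡点:%d,值为:%d' % (i, x)
--             prefix += x
--             i += 1
--         return '无平衡点'
--     return '至少输入3个元素以上的列表'
-- ===== Notes on version B (the rewrite author's own statement) =====
-- stated objective: faster
-- what changed: Replaced the per-index re-summation of both slices with a single running prefix sum checked against the precomputed total in one pass.
import Mathlib
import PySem

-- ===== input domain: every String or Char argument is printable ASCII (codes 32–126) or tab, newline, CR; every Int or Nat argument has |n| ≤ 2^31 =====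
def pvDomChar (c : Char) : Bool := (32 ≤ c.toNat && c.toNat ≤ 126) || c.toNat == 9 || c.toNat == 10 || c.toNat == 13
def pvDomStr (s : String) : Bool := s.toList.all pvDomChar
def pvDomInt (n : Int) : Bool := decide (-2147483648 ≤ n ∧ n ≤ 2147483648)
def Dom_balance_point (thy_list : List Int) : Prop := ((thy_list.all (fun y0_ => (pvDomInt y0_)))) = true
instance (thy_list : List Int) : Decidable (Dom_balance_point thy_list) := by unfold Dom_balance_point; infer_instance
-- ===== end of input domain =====

-- B replaces A's per-index re-summing of both slices by a one-pass running prefix sum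
-- compared against the precomputed total (O(n) instead of O(n^2)); same return values.

-- shared message formatting ('平衡点:%d,值为:%d' % (i, v))
def pvMsg (i v : Int) : String :=
  "平衡点:" ++ PySem.Int.toStr i ++ ",值为:" ++ PySem.Int.toStr v

-- ===== PORT A =====
-- the for-loop over range(num): first balancing index wins, else '无平衡点'
def goA (l : List Int) : List Int → String
  | [] => "无平衡点"
  | i :: rest =>
    if i = 0 then goA l rest
    else
      let list1 := PySem.List.slice l none (some i)
      let list2 := PySem.List.slice l (some (i + 1)) none
      let sum1 := list1.sum
      let sum2 := list2.sum
      if sum1 = sum2 then pvMsg i (PySem.List.pyGetD l i 0)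
      else goA l rest

def balance_point (thy_list : List Int) : String :=
  let num : Int := thy_list.length
  if num > 3 then goA thy_list (PySem.List.pyRange 0 num 1)
  else "至少输入3个元素以上的列表"

-- ===== PORT B =====
-- for x in thy_list[1:] with running (prefix, i); check 2*prefix + x == total
def goB (total : Int) : Int → Int → List Int → String
  | _, _, [] => "无平衡点"
  | pre, i, x :: rest =>
    if 2 * pre + x = total then pvMsg i x
    else goB total (pre + x) (i + 1) rest

def balance_point_alt (thy_list : List Int) : String :=
  if (thy_list.length : Int) > 3 then
    let total := thy_list.sum
    let pre := PySem.List.pyGetD thy_list 0 0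
    goB total pre 1 (PySem.List.slice thy_list (some 1) none)
  else "至少输入3个元素以上的列表"

-- ===== PRECONDITION & SPEC =====
def Spec_balance_point (thy_list : List Int) (out : String) : Prop := out = balance_point_alt thy_list
instance (thy_list : List Int) (out : String) : Decidable (Spec_balance_point thy_list out) := by unfold Spec_balance_point; infer_instance

-- ===== CLAIM (what is proved, stated in full; the proofs are below) =====
def Claim_equal_balance_point : Prop := ∀ (thy_list : List Int), Dom_balance_point thy_list → Spec_balance_point thy_list (balance_point thy_list)

-- ===== LEMMAS AND PROOFS =====

-- the loop invariant: from index k (1 ≤ k ≤ n) with prefix = sum of the first k elements,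
-- A's remaining scan and B's remaining one-pass scan agree.
theorem goA_eq_goB (l : List Int) (m : Nat) : ∀ (k : Nat), 1 ≤ k → l.length = k + m →
    goA l (PySem.List.pyRange (k : Int) (l.length : Int) 1)
      = goB l.sum (l.take k).sum (k : Int) (l.drop k) := by
  induction m with
  | zero =>
    intro k hk1 hlen
    rw [PySem.List.pyRange_one_eq_nil (by exact_mod_cast Nat.le_of_eq hlen),
        List.drop_of_length_le (by omega)]
    rfl
  | succ m ih =>
    intro k hk1 hlen
    have hkl : k < l.length := by omega
    have hcons : l.drop k = l[k] :: l.drop (k + 1) := List.drop_eq_getElem_cons hkl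
    rw [PySem.List.pyRange_one_cons (by exact_mod_cast hkl), hcons]
    simp only [goA, goB]
    rw [if_neg (by exact_mod_cast (by omega : ¬ k = 0))]
    rw [PySem.List.slice_to_natCast]
    rw [(by push_cast; ring : (k : Int) + 1 = ((k + 1 : Nat) : Int)),
        PySem.List.slice_from_natCast]
    have hsum : (l.take k).sum + (l[k] + (l.drop (k + 1)).sum) = l.sum := by
      have hsplit := List.sum_take_add_sum_drop l k
      rw [hcons, List.sum_cons] at hsplit
      omega
    by_cases hc : (l.take k).sum = (l.drop (k + 1)).sum
    · rw [if_pos hc, if_pos (by omega)]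
      rw [PySem.List.pyGetD_natCast, List.getD_eq_getElem l 0 hkl]
    · rw [if_neg hc, if_neg (by omega)]
      have h2 := ih (k + 1) (by omega) (by omega)
      rw [List.sum_take_succ l k hkl] at h2
      rw [← h2]

theorem balance_point_spec : Claim_equal_balance_point := by
  intro l _
  unfold Spec_balance_point balance_point balance_point_alt
  by_cases h : (l.length : Int) > 3
  · simp only [if_pos h]
    have h4 : 4 ≤ l.length := by exact_mod_cast h
    have h0 : 0 < l.length := by omega
    rw [PySem.List.pyRange_one_cons (by exact_mod_cast h0)]
    simp only [goA, if_true, zero_add]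
    have h1 := goA_eq_goB l (l.length - 1) 1 le_rfl (by omega)
    rw [List.sum_take_succ l 0 h0] at h1
    simp only [List.take_zero, List.sum_nil, zero_add, Nat.cast_one, List.drop_one] at h1
    rw [h1, PySem.List.slice_from_one, PySem.List.pyGetD_zero,
        List.getD_eq_getElem l 0 h0]
  · simp only [if_neg h]
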